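-- pv_equiv track=rewrite | github.com/pypi-data/pypi-mirror-135 | packages/zyl-utils/zyl_utils-0.1.4.tar.gz/zyl_utils-0.1.4/zyl_utils/model_utils/ner_utils.py | combine_pred_target_texts_by_ids
-- ===== SOURCE A (Python) =====
-- def combine_pred_target_texts_by_ids(pred_target_texts, split_ids, delimiter: str = '|') -> list:
--     """combine truncated_predicted_target_texts split_ids
--
--     Args:
--         pred_target_texts: the result of predicting the truncated input_texts
--         split_ids: get the truncated_ids when truncating input_texts
--         delimiter: the delimiter in target_text to split different entities
--
--     Returns:
--         pred_target_texts: predicted target_texts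
--     """
--     ids_target_text_dict = dict()
--     for i, j in zip(split_ids, pred_target_texts):
--         if not ids_target_text_dict.get(i):
--             ids_target_text_dict[i] = delimiter + j + delimiter
--         else:
--             ids_target_text_dict[i] = ids_target_text_dict[i] + j + delimiter
--
--     pred_target_texts = [ids_target_text_dict[k] for k in sorted(ids_target_text_dict.keys())]
--     return pred_target_texts  # type:list
-- ===== SOURCE B (Python) =====
-- # B: sort the (id, text) pairs stably by id, then group consecutive runs with
-- # itertools.groupby and emit delimiter + delimiter.join(texts) + delimiter per run.
-- from itertools import groupby
--
--
-- def combine_pred_target_texts_by_ids(pred_target_texts, split_ids, delimiter: str = '|') -> list: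
--     pairs = sorted(zip(split_ids, pred_target_texts), key=lambda p: p[0])
--     return [delimiter + delimiter.join(t for _, t in grp) + delimiter
--             for _, grp in groupby(pairs, key=lambda p: p[0])]
-- ===== Notes on version B (the rewrite author's own statement) =====
-- stated objective: idiomatic
-- what changed: Replaces the dict of incrementally concatenated per-id strings with a stable sort of the (id, text) pairs followed by an itertools.groupby linear scan that joins each run's texts in one step.
import Mathlib
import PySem

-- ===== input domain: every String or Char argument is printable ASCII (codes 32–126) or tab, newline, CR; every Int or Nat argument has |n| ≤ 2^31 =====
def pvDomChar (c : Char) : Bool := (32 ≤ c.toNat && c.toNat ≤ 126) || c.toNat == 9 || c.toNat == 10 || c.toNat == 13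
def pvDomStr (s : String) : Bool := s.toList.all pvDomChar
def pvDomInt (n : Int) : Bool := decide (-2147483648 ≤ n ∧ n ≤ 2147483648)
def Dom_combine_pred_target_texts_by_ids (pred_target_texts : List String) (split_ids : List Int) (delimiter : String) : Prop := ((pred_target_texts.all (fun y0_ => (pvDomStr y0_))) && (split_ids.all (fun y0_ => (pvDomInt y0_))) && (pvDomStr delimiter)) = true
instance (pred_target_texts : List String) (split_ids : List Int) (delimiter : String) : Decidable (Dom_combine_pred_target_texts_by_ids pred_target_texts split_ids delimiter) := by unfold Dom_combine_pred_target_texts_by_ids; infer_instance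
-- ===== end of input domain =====

-- B groups the id-sorted pairs in one linear scan (sort + groupby) instead of
-- accumulating per-id strings in a dict; objective: idiomatic (no speed claim).

-- ===== PORT A =====
-- 'if not ids_target_text_dict.get(i)': get(i) is None (absent) or the stored string;
-- 'not x' holds exactly when it is None or ""; (get? ...).getD "" = "" captures both.
def combine_pred_target_texts_by_ids (pred_target_texts : List String) (split_ids : List Int) (delimiter : String) : List String :=
  let dct : PySem.Dict Int String :=
    (split_ids.zip pred_target_texts).foldl
      (fun dct ij =>
        if (dct.get? ij.1).getD "" = "" then
          dct.insert ij.1 (delimiter ++ ij.2 ++ delimiter)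
        else
          dct.insert ij.1 (dct.getD ij.1 "" ++ ij.2 ++ delimiter))
      PySem.Dict.empty
  (PySem.List.sorted dct.keys (fun k => k) false).map (fun k => dct.getD k "")

-- ===== PORT B =====
-- itertools.groupby over a list sorted by the key = consecutive runs of equal first component
def groupRuns : List (Int × String) → List (Int × List String)
  | [] => []
  | p :: rest =>
      (p.1, p.2 :: (rest.takeWhile (fun q => q.1 == p.1)).map (fun q => q.2)) ::
      groupRuns (rest.dropWhile (fun q => q.1 == p.1))
termination_by l => l.length
decreasing_by
  simp only [List.length_cons]
  have := List.length_dropWhile_le (fun q => q.1 == p.1) rest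
  omega


def combine_pred_target_texts_by_ids_alt (pred_target_texts : List String) (split_ids : List Int) (delimiter : String) : List String :=
  let pairs := split_ids.zip pred_target_texts
  (groupRuns (PySem.List.sorted pairs (fun p => p.1) false)).map
    (fun g => delimiter ++ PySem.Str.join delimiter g.2 ++ delimiter)

-- ===== PRECONDITION & SPEC =====
def Spec_combine_pred_target_texts_by_ids (pred_target_texts : List String) (split_ids : List Int) (delimiter : String) (out : List String) : Prop := out = combine_pred_target_texts_by_ids_alt pred_target_texts split_ids delimiter
instance (pred_target_texts : List String) (split_ids : List Int) (delimiter : String) (out : List String) : Decidable (Spec_combine_pred_target_texts_by_ids pred_target_texts split_ids delimiter out) := by unfold Spec_combine_pred_target_texts_by_ids; infer_instance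

-- ===== CLAIM (what is proved, stated in full; the proofs are below) =====
def Claim_equal_combine_pred_target_texts_by_ids : Prop := ∀ (pred_target_texts : List String) (split_ids : List Int) (delimiter : String), Dom_combine_pred_target_texts_by_ids pred_target_texts split_ids delimiter → Spec_combine_pred_target_texts_by_ids pred_target_texts split_ids delimiter (combine_pred_target_texts_by_ids pred_target_texts split_ids delimiter)

-- ===== LEMMAS AND PROOFS =====

lemma joinChars_append (sep t : List Char) (vs : List (List Char)) (h : vs ≠ []) :
    PySem.Chars.join sep (vs ++ [t]) = PySem.Chars.join sep vs ++ sep ++ t := by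
  induction vs with
  | nil => exact absurd rfl h
  | cons v vs ih =>
    cases vs with
    | nil => simp [PySem.Chars.join_cons_cons, PySem.Chars.join_singleton]
    | cons w ws =>
      have := ih (by simp)
      simp only [List.cons_append, PySem.Chars.join_cons_cons] at *
      simp [this]

lemma join_append_singleton (d t : String) (vs : List String) (h : vs ≠ []) :
    PySem.Str.join d (vs ++ [t]) = PySem.Str.join d vs ++ d ++ t := by
  apply String.toList_inj.mp
  simp only [PySem.Str.toList_join, List.map_append, List.map_cons, List.map_nil,
    String.toList_append]
  rw [joinChars_append _ _ _ (by simpa using h)]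

lemma join_singleton_str (d t : String) : PySem.Str.join d [t] = t := by
  apply String.toList_inj.mp
  simp [PySem.Str.toList_join, PySem.Chars.join_singleton]

def accStep (d : String) (s t : String) : String :=
  if s = "" then d ++ t ++ d else s ++ t ++ d

lemma accStep_wrapped (d t : String) (vs : List String) (h : vs ≠ []) :
    accStep d (d ++ PySem.Str.join d vs ++ d) t = d ++ PySem.Str.join d (vs ++ [t]) ++ d := by
  rw [join_append_singleton d t vs h]
  unfold accStep
  by_cases hs : d ++ PySem.Str.join d vs ++ d = ""
  · have h2 : d.toList = [] ∧ (PySem.Str.join d vs).toList = [] := by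
      have := congrArg String.toList hs
      simp only [String.toList_append] at this
      rcases List.append_eq_nil_iff.mp this with ⟨h1, h2⟩
      rcases List.append_eq_nil_iff.mp h1 with ⟨ha, hb⟩
      exact ⟨ha, hb⟩
    have hd : d = "" := String.toList_inj.mp (by simp [h2.1])
    have hj : PySem.Str.join d vs = "" := String.toList_inj.mp (by simp [h2.2])
    rw [if_pos hs]
    subst hd
    simp only [String.empty_append, String.append_empty] at *
    rw [hj]
    simp
  · rw [if_neg hs]
    simp [String.append_assoc]

lemma foldl_accStep_wrapped (d : String) (ts : List String) : ∀ vs : List String, vs ≠ [] →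
    ts.foldl (accStep d) (d ++ PySem.Str.join d vs ++ d) = d ++ PySem.Str.join d (vs ++ ts) ++ d := by
  induction ts with
  | nil => intro vs h; simp
  | cons t ts ih =>
    intro vs h
    rw [List.foldl_cons, accStep_wrapped d t vs h, ih (vs ++ [t]) (by simp)]
    simp

lemma foldl_accStep_nil (d t : String) (ts : List String) :
    (t :: ts).foldl (accStep d) "" = d ++ PySem.Str.join d (t :: ts) ++ d := by
  rw [List.foldl_cons]
  have h1 : accStep d "" t = d ++ PySem.Str.join d [t] ++ d := by
    unfold accStep
    rw [if_pos rfl, join_singleton_str]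
  rw [h1, foldl_accStep_wrapped d ts [t] (by simp)]
  simp

lemma getD_fold (d : String) (k : Int) (ps : List (Int × String)) :
    ∀ dct : PySem.Dict Int String,
      (ps.foldl
        (fun dct ij =>
          if (dct.get? ij.1).getD "" = "" then dct.insert ij.1 (d ++ ij.2 ++ d)
          else dct.insert ij.1 (dct.getD ij.1 "" ++ ij.2 ++ d)) dct).getD k ""
      = ((ps.filter (fun p => p.1 == k)).map (fun p => p.2)).foldl (accStep d) (dct.getD k "") := by
  induction ps with
  | nil => intro dct; simp
  | cons p ps ih =>
    intro dct
    rw [List.foldl_cons]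
    by_cases hk : p.1 = k
    · have hstep : (if (dct.get? p.1).getD "" = "" then dct.insert p.1 (d ++ p.2 ++ d)
          else dct.insert p.1 (dct.getD p.1 "" ++ p.2 ++ d))
          = dct.insert p.1 (accStep d (dct.getD p.1 "") p.2) := by
        unfold accStep
        rw [PySem.Dict.getD_eq_get?_getD]
        split <;> rfl
      rw [hstep, ih]
      have : (dct.insert p.1 (accStep d (dct.getD p.1 "") p.2)).getD k ""
          = accStep d (dct.getD k "") p.2 := by
        subst hk; rw [PySem.Dict.getD_insert_self]
      rw [this]
      simp [hk]
    · have h1 : ∀ v, (dct.insert p.1 v).getD k "" = dct.getD k "" := by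
        intro v; exact PySem.Dict.getD_insert_of_ne _ _ _ (fun h => hk h.symm)
      have h2 : (p.1 == k) = false := by simp [hk]
      split <;> · rw [ih, h1]; simp [h2]

lemma keys_fold (d : String) (ps : List (Int × String)) :
    (ps.foldl
      (fun dct ij =>
        if (dct.get? ij.1).getD "" = "" then dct.insert ij.1 (d ++ ij.2 ++ d)
        else dct.insert ij.1 (dct.getD ij.1 "" ++ ij.2 ++ d)) PySem.Dict.empty).keys
    = PySem.Set.ofList (ps.map (fun p => p.1)) := by
  have hfun : (fun (dct : PySem.Dict Int String) (ij : Int × String) =>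
      if (dct.get? ij.1).getD "" = "" then dct.insert ij.1 (d ++ ij.2 ++ d)
      else dct.insert ij.1 (dct.getD ij.1 "" ++ ij.2 ++ d))
      = (fun dct ij => dct.insert ij.1
          (if (dct.get? ij.1).getD "" = "" then d ++ ij.2 ++ d else dct.getD ij.1 "" ++ ij.2 ++ d)) := by
    funext dct ij; split <;> rfl
  rw [hfun, PySem.Dict.keys_foldl_insert_key ps (fun ij => ij.1)]
  simp [PySem.Dict.keys_empty, PySem.Set.update, PySem.Set.ofList]

lemma filter_insertBy (k : Int) (x : Int × String) : ∀ ys : List (Int × String),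
    ys.Pairwise (fun a b => a.1 ≤ b.1) →
    (PySem.List.insertBy (fun a b => decide (a.1 < b.1)) x ys).filter (fun p => p.1 == k)
    = if x.1 = k then ys.filter (fun p => p.1 == k) ++ [x]
      else ys.filter (fun p => p.1 == k) := by
  intro ys
  induction ys with
  | nil =>
    intro _
    simp only [PySem.List.insertBy, List.filter_nil]
    by_cases hxk : x.1 = k <;> simp [hxk]
  | cons y ys ih =>
    intro hp
    rw [List.pairwise_cons] at hp
    by_cases hb : x.1 < y.1
    · have hins : PySem.List.insertBy (fun a b => decide (a.1 < b.1)) x (y :: ys) = x :: y :: ys := by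
        simp [PySem.List.insertBy, hb]
      rw [hins]
      by_cases hxk : x.1 = k
      · have hnil : (y :: ys).filter (fun p => p.1 == k) = [] := by
          apply List.filter_eq_nil_iff.mpr
          intro a ha
          have hya : y.1 ≤ a.1 := by
            rcases List.mem_cons.mp ha with h | h
            · exact h ▸ le_refl _
            · exact hp.1 a h
          have : k < a.1 := lt_of_lt_of_le (hxk ▸ hb) hya
          simp [this.ne']
        rw [if_pos hxk, List.filter_cons_of_pos (by simp [hxk]), hnil]
        simp
      · simp only [List.filter_cons]
        simp [hxk]
    · have hins : PySem.List.insertBy (fun a b => decide (a.1 < b.1)) x (y :: ys)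
          = y :: PySem.List.insertBy (fun a b => decide (a.1 < b.1)) x ys := by
        simp [PySem.List.insertBy, hb]
      rw [hins, List.filter_cons, ih hp.2, List.filter_cons]
      by_cases hxk : x.1 = k <;> by_cases hyk : (y.1 == k) <;> simp [hxk, hyk]

lemma filter_sorted (ps : List (Int × String)) (k : Int) :
    (PySem.List.sorted ps (fun p => p.1) false).filter (fun p => p.1 == k)
    = ps.filter (fun p => p.1 == k) := by
  induction ps using List.reverseRecOn with
  | nil => simp [PySem.List.sorted]
  | append_singleton ps x ih =>
    rw [PySem.List.sorted_eq_foldl_insertBy, List.foldl_append, List.foldl_cons, List.foldl_nil,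
      ← PySem.List.sorted_eq_foldl_insertBy,
      filter_insertBy k x _ (PySem.List.sorted_pairwise ps (fun p => p.1)),
      List.filter_append]
    by_cases hxk : x.1 = k <;> simp [hxk, ih]

lemma dropWhile_keys_gt (p : Int × String) (rest : List (Int × String))
    (h : (p :: rest).Pairwise (fun a b => a.1 ≤ b.1)) :
    ∀ r ∈ rest.dropWhile (fun q => q.1 == p.1), p.1 < r.1 := by
  rw [List.pairwise_cons] at h
  induction rest with
  | nil => simp
  | cons a rest' ih =>
    rw [List.dropWhile_cons]
    rw [List.pairwise_cons] at h
    by_cases ha : a.1 = p.1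
    · rw [if_pos (by simp [ha])]
      exact ih ⟨fun b hb => h.1 b (List.mem_cons_of_mem a hb), h.2.2⟩
    · rw [if_neg (by simp [ha])]
      intro r hr
      have hpa : p.1 < a.1 := lt_of_le_of_ne (h.1 a (List.mem_cons_self)) (Ne.symm ha)
      rcases List.mem_cons.mp hr with rfl | hr
      · exact hpa
      · exact lt_of_lt_of_le hpa (h.2.1 r hr)

lemma filter_head_run (p : Int × String) (rest : List (Int × String))
    (h : (p :: rest).Pairwise (fun a b => a.1 ≤ b.1)) :
    (p :: rest).filter (fun q => q.1 == p.1) = p :: rest.takeWhile (fun q => q.1 == p.1) := by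
  rw [List.filter_cons_of_pos (by simp)]
  congr 1
  conv_lhs => rw [← List.takeWhile_append_dropWhile (p := fun q => q.1 == p.1) (l := rest)]
  rw [List.filter_append, List.filter_eq_self.mpr (fun a ha => List.mem_takeWhile_imp (p := fun q : Int × String => q.1 == p.1) ha),
    List.filter_eq_nil_iff.mpr (fun a ha => by simp [(dropWhile_keys_gt p rest h a ha).ne']),
    List.append_nil]

lemma filter_gt_head (p : Int × String) (rest : List (Int × String)) (k : Int)
    (hk : p.1 < k) :
    (p :: rest).filter (fun q => q.1 == k)
    = (rest.dropWhile (fun q => q.1 == p.1)).filter (fun q => q.1 == k) := by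
  rw [List.filter_cons_of_neg (by simp [hk.ne])]
  conv_lhs => rw [← List.takeWhile_append_dropWhile (p := fun q => q.1 == p.1) (l := rest)]
  rw [List.filter_append,
    List.filter_eq_nil_iff.mpr (fun a ha => by
      have := List.mem_takeWhile_imp ha
      simp only [beq_iff_eq] at this
      simp [this, hk.ne]),
    List.nil_append]

lemma mem_heads_groupRuns (l : List (Int × String)) (k : Int) :
    k ∈ (groupRuns l).map (fun g => g.1) ↔ k ∈ l.map (fun p => p.1) := by
  induction l using groupRuns.induct with
  | case1 => simp [groupRuns]
  | case2 p rest ih =>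
    rw [groupRuns]
    simp only [List.map_cons, List.mem_cons]
    constructor
    · rintro (rfl | hk)
      · exact Or.inl rfl
      · right
        have := ih.mp hk
        have hsub : List.Sublist ((rest.dropWhile (fun q => q.1 == p.1)).map (fun p => p.1)) (rest.map (fun p => p.1)) :=
          (List.dropWhile_sublist _).map _
        exact hsub.mem this
    · rintro (rfl | hk)
      · exact Or.inl rfl
      · rcases List.mem_map.mp hk with ⟨r, hr, rfl⟩
        conv at hr => rw [← List.takeWhile_append_dropWhile (p := fun q => q.1 == p.1) (l := rest)]
        rcases List.mem_append.mp hr with hr | hr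
        · have := List.mem_takeWhile_imp hr
          simp only [beq_iff_eq] at this
          exact Or.inl this
        · exact Or.inr (ih.mpr (List.mem_map_of_mem hr))

lemma heads_groupRuns_pairwise (l : List (Int × String))
    (h : l.Pairwise (fun a b => a.1 ≤ b.1)) :
    ((groupRuns l).map (fun g => g.1)).Pairwise (· < ·) := by
  induction l using groupRuns.induct with
  | case1 => simp [groupRuns]
  | case2 p rest ih =>
    rw [groupRuns]
    have hdw : (rest.dropWhile (fun q => q.1 == p.1)).Pairwise (fun a b => a.1 ≤ b.1) :=
      List.Pairwise.sublist ((List.dropWhile_sublist _).cons _) h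
    simp only [List.map_cons, List.pairwise_cons]
    refine ⟨?_, ih hdw⟩
    intro k hk
    rcases List.mem_map.mp ((mem_heads_groupRuns _ k).mp hk) with ⟨r, hr, rfl⟩
    exact dropWhile_keys_gt p rest h r hr

lemma groupRuns_eq (l : List (Int × String)) (h : l.Pairwise (fun a b => a.1 ≤ b.1)) :
    groupRuns l = ((groupRuns l).map (fun g => g.1)).map
      (fun k => (k, (l.filter (fun q => q.1 == k)).map (fun q => q.2))) := by
  induction l using groupRuns.induct with
  | case1 => simp [groupRuns]
  | case2 p rest ih =>
    have hdw : (rest.dropWhile (fun q => q.1 == p.1)).Pairwise (fun a b => a.1 ≤ b.1) :=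
      List.Pairwise.sublist ((List.dropWhile_sublist _).cons _) h
    rw [groupRuns]
    simp only [List.map_cons]
    congr 1
    · rw [filter_head_run p rest h]
      simp
    · conv_lhs => rw [ih hdw]
      apply List.map_congr_left
      intro k hk
      rcases List.mem_map.mp ((mem_heads_groupRuns _ k).mp hk) with ⟨r, hr, rfl⟩
      rw [filter_gt_head p rest r.1 (dropWhile_keys_gt p rest h r hr)]

-- ===== VERDICT (by name: the statement is the Claim_ definition above) =====
theorem combine_pred_target_texts_by_ids_spec : Claim_equal_combine_pred_target_texts_by_ids := by
  intro texts ids d _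
  unfold Spec_combine_pred_target_texts_by_ids
  unfold combine_pred_target_texts_by_ids combine_pred_target_texts_by_ids_alt
  simp only []
  set ps := ids.zip texts with hps
  set sl := PySem.List.sorted ps (fun p => p.1) false with hsl
  have hsorted : sl.Pairwise (fun a b => a.1 ≤ b.1) := PySem.List.sorted_pairwise ps (fun p => p.1)
  -- B side rewrite
  rw [groupRuns_eq sl hsorted, List.map_map]
  -- A side rewrite
  rw [keys_fold]
  -- the two index lists coincide
  have hlt : ((groupRuns sl).map (fun g => g.1)).Pairwise (fun a b => a < b) :=
    heads_groupRuns_pairwise sl hsorted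
  have hnd : ((groupRuns sl).map (fun g => g.1)).Nodup :=
    hlt.imp (fun h => ne_of_lt h)
  have hmem : ∀ k, k ∈ (groupRuns sl).map (fun g => g.1) ↔ k ∈ PySem.Set.ofList (ps.map (fun p => p.1)) := by
    intro k
    rw [mem_heads_groupRuns, PySem.Set.mem_ofList]
    have : sl.Perm ps := PySem.List.sorted_perm ps (fun p => p.1) false
    exact (this.map (fun p => p.1)).mem_iff
  have hK : PySem.List.sorted (PySem.Set.ofList (ps.map (fun p => p.1))) (fun k => k) false
      = (groupRuns sl).map (fun g => g.1) :=
    PySem.List.sorted_eq_of_perm_of_pairwise_lt _ _ _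
      ((List.perm_ext_iff_of_nodup hnd (PySem.Set.nodup_ofList _)).mpr hmem) hlt
  rw [hK]
  apply List.map_congr_left
  intro k hk
  rw [getD_fold, PySem.Dict.getD_empty]
  simp only [Function.comp_apply]
  rw [hsl, filter_sorted ps k]
  have hkmem : k ∈ ps.map (fun p => p.1) := by
    have h1 : k ∈ sl.map (fun p => p.1) := (mem_heads_groupRuns sl k).mp hk
    exact ((PySem.List.sorted_perm ps (fun p => p.1) false).map (fun p => p.1)).mem_iff.mp h1
  have hne : (ps.filter (fun p => p.1 == k)).map (fun p => p.2) ≠ [] := by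
    rcases List.mem_map.mp hkmem with ⟨r, hr, rfl⟩
    have : r ∈ ps.filter (fun p => p.1 == r.1) := List.mem_filter.mpr ⟨hr, by simp⟩
    intro hcon
    rw [List.map_eq_nil_iff] at hcon
    rw [hcon] at this
    exact List.not_mem_nil this
  rcases List.exists_cons_of_ne_nil hne with ⟨t, ts, hts⟩
  rw [hts, foldl_accStep_nil]
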